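-- pv_equiv track=rewrite | github.com/Vyacheslav314/bot | parser.py | read_weather
-- ===== SOURCE A (Python) =====
-- def read_weather(data):
--     my_list = []
--     temp_list = []
--     for i in range(len(data)):
--         if i % 12 == 0 and i != 0:
--             continue
--         else:
--             temp_list.append(data[i])
--             if len(temp_list) == 11:
--                 my_list.append(temp_list)
--                 temp_list = []
--             if len(my_list) == 5:
--                 break
--     return my_list
-- ===== SOURCE B (Python) =====
-- def _chunks(kept, k):
--     if k == 0 or len(kept) < 11:
--         return []
--     return [kept[:11]] + _chunks(kept[11:], k - 1)
--
--
-- def read_weather(data):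
--     kept = [x for i, x in enumerate(data) if i % 12 != 0 or i == 0]
--     return _chunks(kept, 5)
-- ===== Notes on version B (the rewrite author's own statement) =====
-- stated objective: simpler
-- what changed: Replaces the interleaved filter-accumulate-count loop by two phases: a comprehension that keeps every index with i % 12 != 0 or i == 0, then a slice-based chunker that cuts the kept list into at most five full 11-element windows.
import Mathlib
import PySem

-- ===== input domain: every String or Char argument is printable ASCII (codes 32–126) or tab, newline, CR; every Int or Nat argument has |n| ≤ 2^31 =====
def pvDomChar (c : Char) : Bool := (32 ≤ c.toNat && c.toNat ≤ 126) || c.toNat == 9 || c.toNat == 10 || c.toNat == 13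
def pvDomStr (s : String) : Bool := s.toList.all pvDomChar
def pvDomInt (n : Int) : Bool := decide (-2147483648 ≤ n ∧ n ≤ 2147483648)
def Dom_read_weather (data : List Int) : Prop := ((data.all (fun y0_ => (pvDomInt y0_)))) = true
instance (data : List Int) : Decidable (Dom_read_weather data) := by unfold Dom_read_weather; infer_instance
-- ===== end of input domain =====

-- B: two-phase rewrite of A's interleaved loop — filter the kept indices first, then chunk
-- by slicing into at most five full 11-windows; same result, simpler decomposition.


-- ===== PORT A =====
-- A's for-loop with break, as structural recursion over the index list; state = (my_list, temp_list)
def read_weather_loop (data : List Int) (idxs : List Int)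
    (my : List (List Int)) (temp : List Int) : List (List Int) :=
  match idxs with
  | [] => my
  | i :: rest =>
    if PySem.Int.mod i 12 == 0 && i != 0 then
      read_weather_loop data rest my temp
    else
      let temp1 := temp ++ [PySem.List.pyGetD data i 0]    -- data[i]; i ∈ range(len(data)) so in range
      if temp1.length == 11 then
        let my1 := my ++ [temp1]
        if my1.length == 5 then my1 else read_weather_loop data rest my1 []
      else
        if my.length == 5 then my else read_weather_loop data rest my temp1

def read_weather (data : List Int) : List (List Int) :=
  read_weather_loop data (PySem.List.pyRange 0 data.length 1) [] []

-- ===== PORT B =====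
-- _chunks(kept, k): at most k leading full 11-windows of kept, by slicing
def read_weather_chunks (kept : List Int) : Nat → List (List Int)
  | 0 => []
  | k + 1 =>
    if kept.length < 11 then []
    else PySem.List.slice kept none (some 11) ::
         read_weather_chunks (PySem.List.slice kept (some 11) none) k

def read_weather_alt (data : List Int) : List (List Int) :=
  read_weather_chunks
    (((PySem.List.enumerate data 0).filter
        (fun p => PySem.Int.mod p.1 12 != 0 || p.1 == 0)).map Prod.snd) 5

-- ===== PRECONDITION & SPEC =====
def Spec_read_weather (data : List Int) (out : List (List Int)) : Prop := out = read_weather_alt data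
instance (data : List Int) (out : List (List Int)) : Decidable (Spec_read_weather data out) := by unfold Spec_read_weather; infer_instance

-- ===== CLAIM (what is proved, stated in full; the proofs are below) =====
def Claim_equal_read_weather : Prop := ∀ (data : List Int), Dom_read_weather data → Spec_read_weather data (read_weather data)

-- ===== LEMMAS AND PROOFS =====

-- the values A's loop appends: data[i] for the indices i it does not skip
def keptA (data : List Int) (idxs : List Int) : List Int :=
  (idxs.filter (fun i => !(PySem.Int.mod i 12 == 0 && i != 0))).map
    (fun i => PySem.List.pyGetD data i 0)

theorem chunks_succ (kept : List Int) (k : Nat) :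
    read_weather_chunks kept (k + 1) =
      if kept.length < 11 then []
      else kept.take 11 :: read_weather_chunks (kept.drop 11) k := by
  rw [read_weather_chunks]
  rw [PySem.List.slice_to kept (by norm_num), PySem.List.slice_from kept (by norm_num)]
  rfl

theorem chunks_short (kept : List Int) (k : Nat) (h : kept.length < 11) :
    read_weather_chunks kept k = [] := by
  cases k with
  | zero => rfl
  | succ k => rw [chunks_succ]; simp [h]

theorem loop_eq (data : List Int) (idxs : List Int) (my : List (List Int)) (temp : List Int)
    (hmy : my.length < 5) (htemp : temp.length < 11) :
    read_weather_loop data idxs my temp =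
      my ++ read_weather_chunks (temp ++ keptA data idxs) (5 - my.length) := by
  induction idxs generalizing my temp with
  | nil =>
    simp [read_weather_loop, keptA, chunks_short temp _ htemp]
  | cons i rest ih =>
    rw [read_weather_loop]
    cases hsk : (PySem.Int.mod i 12 == 0 && i != 0) with
    | true =>
      have hk : keptA data (i :: rest) = keptA data rest := by
        simp only [keptA, List.filter_cons, hsk, Bool.not_true, Bool.false_eq_true, if_false]
      rw [if_pos rfl, hk, ih my temp hmy htemp]
    | false =>
      have hk : keptA data (i :: rest) =
          PySem.List.pyGetD data i 0 :: keptA data rest := by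
        simp only [keptA, List.filter_cons, hsk, Bool.not_false, if_true, List.map_cons]
      rw [if_neg (by simp), hk]
      set x := PySem.List.pyGetD data i 0 with hx
      have hcons : temp ++ x :: keptA data rest = (temp ++ [x]) ++ keptA data rest := by
        simp
      by_cases hfull : (temp ++ [x]).length = 11
      · -- group completes
        have ht10 : temp.length = 10 := by simpa using hfull
        have hnotlt : ¬ ((temp ++ [x]) ++ keptA data rest).length < 11 := by
          simp only [List.length_append, List.length_cons, List.length_nil, ht10]; omega
        have htk : ((temp ++ [x]) ++ keptA data rest).take 11 = temp ++ [x] := by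
          rw [List.take_append_of_le_length (by simp [ht10]), List.take_of_length_le (by simp [ht10])]
        have hdr : ((temp ++ [x]) ++ keptA data rest).drop 11 = keptA data rest := by
          rw [← hfull, List.drop_left]
        rw [if_pos (by simp [hfull])]
        by_cases hlast : my.length + 1 = 5
        · rw [if_pos (by simp [hlast])]
          have h5 : 5 - my.length = 1 := by omega
          rw [hcons, h5, chunks_succ, if_neg hnotlt, htk]
          simp [read_weather_chunks]
        · rw [if_neg (by simp; omega)]
          rw [ih (my ++ [temp ++ [x]]) [] (by simp; omega) (by simp)]
          have h5 : 5 - my.length = (5 - (my.length + 1)) + 1 := by omega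
          rw [hcons, h5, chunks_succ, if_neg hnotlt, htk, hdr]
          simp
      · -- temp still partial
        have ht : temp.length ≠ 10 := by
          intro h; exact hfull (by simp [h])
        have hlt : (temp ++ [x]).length < 11 := by simp; omega
        rw [if_neg (by simp; omega), if_neg (by simp; omega)]
        rw [ih my (temp ++ [x]) hmy hlt]
        simp

theorem keptB_eq (data : List Int) :
    ((PySem.List.enumerate data 0).filter
        (fun p => PySem.Int.mod p.1 12 != 0 || p.1 == 0)).map Prod.snd =
      keptA data (PySem.List.pyRange 0 data.length 1) := by
  rw [PySem.List.enumerate_eq_map_pyRange (d := 0), List.filter_map, List.map_map, keptA]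
  congr 1
  apply List.filter_congr
  intro i _
  cases h : PySem.Int.mod i 12 == 0 <;> cases h2 : i != 0 <;> simp_all

theorem read_weather_spec' (data : List Int) :
    read_weather data = read_weather_alt data := by
  rw [read_weather, read_weather_alt, keptB_eq,
      loop_eq data _ [] [] (by simp) (by simp)]
  simp

-- ===== VERDICT (by name: the statement is the Claim_ definition above) =====
theorem read_weather_spec : Claim_equal_read_weather := by
  intro data _
  exact read_weather_spec' data
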